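-- pv_equiv track=rewrite | github.com/Adj325/BlogCrawlers | @博客爬取.py | get_blog_name
-- ===== SOURCE A (Python) =====
-- def get_blog_name(blog_title):
--     blog_name = blog_title[::]
--     replace_words = (
--         ('\n', ''),
--         ('*', '_'),
--         ('/', '_'),
--         (':', '：'),
--     )
--     for src, dst in replace_words:
--         blog_name = blog_name.replace(src, dst)
--     return blog_name
-- ===== SOURCE B (Python) =====
-- def get_blog_name(blog_title):
--     table = {ord('\n'): None, ord('*'): '_', ord('/'): '_', ord(':'): '\uff1a'}
--     return blog_title.translate(table)
-- ===== Notes on version B (the rewrite author's own statement) =====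
-- stated objective: idiomatic
-- what changed: Replaces the loop of four sequential str.replace scans with one str.translate pass over a precomputed per-character translation table.
import Mathlib
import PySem

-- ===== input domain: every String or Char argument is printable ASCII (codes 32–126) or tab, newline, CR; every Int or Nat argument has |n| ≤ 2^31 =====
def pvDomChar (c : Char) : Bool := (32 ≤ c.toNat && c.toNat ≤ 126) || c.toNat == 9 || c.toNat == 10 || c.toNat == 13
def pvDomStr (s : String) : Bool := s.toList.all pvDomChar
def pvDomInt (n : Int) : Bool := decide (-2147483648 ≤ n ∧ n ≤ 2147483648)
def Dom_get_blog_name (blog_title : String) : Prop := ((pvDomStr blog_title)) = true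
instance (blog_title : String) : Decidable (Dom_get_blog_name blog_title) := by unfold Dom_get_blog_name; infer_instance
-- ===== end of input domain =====

-- B replaces A's loop of four sequential str.replace scans with one str.translate pass
-- over a precomputed per-character table (idiomatic; same mappings, one traversal).

-- ===== PORT A =====
def get_blog_name (blog_title : String) : String :=
  let blog_name := PySem.Str.slice blog_title none none   -- blog_title[::]
  let replace_words : List (String × String) :=
    [("\n", ""), ("*", "_"), ("/", "_"), (":", "：")]
  replace_words.foldl (fun bn p => PySem.Str.replace bn p.1 p.2) blog_name

-- ===== PORT B =====
-- the translation table of B, as a per-character lookup (None = delete)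
def pvTable (c : Char) : List Char :=
  if c = '\n' then [] else if c = '*' then ['_'] else if c = '/' then ['_']
  else if c = ':' then ['：'] else [c]

def get_blog_name_alt (blog_title : String) : String :=
  String.ofList (blog_title.toList.flatMap pvTable)

-- ===== PRECONDITION & SPEC =====
def Spec_get_blog_name (blog_title : String) (out : String) : Prop := out = get_blog_name_alt blog_title
instance (blog_title : String) (out : String) : Decidable (Spec_get_blog_name blog_title out) := by unfold Spec_get_blog_name; infer_instance

-- ===== CLAIM (what is proved, stated in full; the proofs are below) =====
def Claim_equal_get_blog_name : Prop := ∀ (blog_title : String), Dom_get_blog_name blog_title → Spec_get_blog_name blog_title (get_blog_name blog_title)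

-- ===== LEMMAS AND PROOFS =====

-- single-character replace is a flatMap over the characters
theorem replace_go_single (c0 : Char) (new : List Char) :
    ∀ (l acc : List Char) (fuel : Nat), l.length ≤ fuel →
      PySem.Chars.replace.go [c0] new fuel l acc
        = acc.reverse ++ l.flatMap (fun c => if c = c0 then new else [c]) := by
  intro l
  induction l with
  | nil =>
      intro acc fuel _
      cases fuel <;> simp [PySem.Chars.replace.go]
  | cons c t ih =>
      intro acc fuel hf
      cases fuel with
      | zero => simp at hf
      | succ fuel =>
        simp only [PySem.Chars.replace.go, List.isPrefixOf]
        by_cases h : c0 = c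
        · subst h
          simp only [BEq.rfl, Bool.true_and, if_true]
          rw [List.flatMap_cons, if_pos rfl]
          simp only [List.length_cons, List.length_nil, Nat.zero_add, List.drop_succ_cons, List.drop_zero]
          rw [ih _ fuel (by simpa using Nat.le_of_succ_le_succ hf)]
          simp
        · have hb : (c0 == c) = false := by simp [h]
          simp only [hb, Bool.false_and, if_neg Bool.false_ne_true]
          rw [ih _ fuel (by simpa using Nat.le_of_succ_le_succ hf)]
          rw [List.flatMap_cons, if_neg (fun hc => h hc.symm)]
          simp

theorem replace_single (c0 : Char) (new s : List Char) :
    PySem.Chars.replace s [c0] new = s.flatMap (fun c => if c = c0 then new else [c]) := by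
  rw [PySem.Chars.replace]
  simp only [List.isEmpty_cons, if_neg Bool.false_ne_true]
  simpa using replace_go_single c0 new s [] s.length (le_refl _)

theorem flatMap_flatMap_table (cs : List Char) :
    ((((cs.flatMap (fun c => if c = '\n' then ([] : List Char) else [c])).flatMap
        (fun c => if c = '*' then ['_'] else [c])).flatMap
        (fun c => if c = '/' then ['_'] else [c])).flatMap
        (fun c => if c = ':' then ['：'] else [c]))
      = cs.flatMap pvTable := by
  induction cs with
  | nil => rfl
  | cons c t ih =>
      simp only [List.flatMap_cons, List.flatMap_append, ih, pvTable]
      congr 1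
      by_cases h1 : c = '\n'
      · simp [h1]
      · by_cases h2 : c = '*'
        · simp [h2]
        · by_cases h3 : c = '/'
          · simp [h3]
          · by_cases h4 : c = ':'
            · simp [h4]
            · simp [h1, h2, h3, h4]

-- ===== VERDICT (by name: the statement is the Claim_ definition above) =====
theorem get_blog_name_spec : Claim_equal_get_blog_name := by
  intro s _
  unfold Spec_get_blog_name get_blog_name get_blog_name_alt
  simp only [List.foldl]
  have hs : PySem.Str.slice s none none = s := by
    apply String.ext
    simp [PySem.Str.slice, PySem.Chars.slice_eq_listSlice, PySem.List.slice]
  rw [hs]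
  apply String.ext
  simp only [PySem.Str.toList_replace, String.toList_ofList]
  rw [show ("\n" : String).toList = ['\n'] from rfl,
      show ("*" : String).toList = ['*'] from rfl,
      show ("/" : String).toList = ['/'] from rfl,
      show (":" : String).toList = [':'] from rfl,
      show ("" : String).toList = [] from rfl,
      show ("_" : String).toList = ['_'] from rfl,
      show ("：" : String).toList = ['：'] from rfl]
  rw [replace_single, replace_single, replace_single, replace_single]
  exact flatMap_flatMap_table s.toList
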